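-- pv_equiv track=rewrite | github.com/wangtf020802-arch/IN6226-Information-Retrieval--Analysis | Assignment2/Assignment2_search_engine.py | vb_decode
-- ===== SOURCE A (Python) =====
-- def vb_decode(bytestream):
--     numbers = []
--     n = 0
--
--     for b in bytestream:
--         if b < 128:
--             n = 128 * n + b
--         else:
--             n = 128 * n + (b - 128)
--             numbers.append(n)
--             n = 0
--
--     return numbers
-- ===== SOURCE B (Python) =====
-- def vb_decode(bytestream):
--     # Phase 1: split the stream into complete groups (terminated by a byte >= 128);
--     # a trailing group with no terminal byte is discarded.
--     groups = []
--     current = []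
--     for b in bytestream:
--         current.append(b)
--         if b >= 128:
--             groups.append(current)
--             current = []
--     # Phase 2: decode each group independently.
--     numbers = []
--     for g in groups:
--         n = 0
--         for x in g[:-1]:
--             n = 128 * n + x
--         numbers.append(128 * n + (g[-1] - 128))
--     return numbers
-- ===== Notes on version B (the rewrite author's own statement) =====
-- stated objective: alternative
-- what changed: Single accumulator loop replaced by a two-phase decomposition: first split the stream into terminator-closed groups, then decode each group independently with a fold.
import Mathlib
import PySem

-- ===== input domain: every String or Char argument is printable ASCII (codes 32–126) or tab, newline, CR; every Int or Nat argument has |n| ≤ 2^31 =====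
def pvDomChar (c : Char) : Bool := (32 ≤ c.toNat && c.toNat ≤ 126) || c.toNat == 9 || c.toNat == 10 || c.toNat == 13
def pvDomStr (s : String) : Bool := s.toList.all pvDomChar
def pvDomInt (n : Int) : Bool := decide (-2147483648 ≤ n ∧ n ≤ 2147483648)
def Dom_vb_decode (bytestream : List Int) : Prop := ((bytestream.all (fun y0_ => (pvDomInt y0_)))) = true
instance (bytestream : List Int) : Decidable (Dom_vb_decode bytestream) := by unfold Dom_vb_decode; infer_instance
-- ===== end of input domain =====

-- ===== PORT A =====
def vb_decode (bytestream : List Int) : List Int :=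
  (bytestream.foldl (fun (st : List Int × Int) b =>
    if b < 128 then (st.1, 128 * st.2 + b)
    else (st.1 ++ [128 * st.2 + (b - 128)], 0)) ([], 0)).1

-- ===== PORT B =====
-- Phase 1: split into terminator-closed groups; trailing incomplete group discarded.
def vbGroups (bytestream : List Int) : List (List Int) :=
  (bytestream.foldl (fun (st : List (List Int) × List Int) b =>
    let cur := st.2 ++ [b]
    if b ≥ 128 then (st.1 ++ [cur], []) else (st.1, cur)) ([], [])).1

-- Phase 2: decode one group (g[:-1] folded, then the terminal byte).
def vbDecodeGroup (g : List Int) : Int :=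
  128 * (g.dropLast.foldl (fun n x => 128 * n + x) 0) + (g.getLastD 0 - 128)

def vb_decode_alt (bytestream : List Int) : List Int :=
  (vbGroups bytestream).map vbDecodeGroup

-- ===== PRECONDITION & SPEC =====
def Spec_vb_decode (bytestream : List Int) (out : List Int) : Prop := out = vb_decode_alt bytestream
instance (bytestream : List Int) (out : List Int) : Decidable (Spec_vb_decode bytestream out) := by unfold Spec_vb_decode; infer_instance

-- ===== CLAIM (what is proved, stated in full; the proofs are below) =====
def Claim_equal_vb_decode : Prop := ∀ (bytestream : List Int), Dom_vb_decode bytestream → Spec_vb_decode bytestream (vb_decode bytestream)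

-- ===== LEMMAS AND PROOFS =====

-- ===== VERDICT (by name: the statement is the Claim_ definition above) =====
-- proof helpers: the step functions (definitionally equal to the ports' lambdas)
def vbStepA (st : List Int × Int) (b : Int) : List Int × Int :=
  if b < 128 then (st.1, 128 * st.2 + b)
  else (st.1 ++ [128 * st.2 + (b - 128)], 0)

def vbStepG (st : List (List Int) × List Int) (b : Int) : List (List Int) × List Int :=
  if b ≥ 128 then (st.1 ++ [st.2 ++ [b]], []) else (st.1, st.2 ++ [b])

def vbPfold (cur : List Int) : Int := cur.foldl (fun n x => 128 * n + x) 0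

theorem vbStepA_lt {b : Int} (h : b < 128) (st : List Int × Int) :
    vbStepA st b = (st.1, 128 * st.2 + b) := by simp [vbStepA, h]

theorem vbStepA_ge {b : Int} (h : b ≥ 128) (st : List Int × Int) :
    vbStepA st b = (st.1 ++ [128 * st.2 + (b - 128)], 0) := by
  have : ¬ b < 128 := by omega
  simp [vbStepA, this]

theorem vbStepG_lt {b : Int} (h : b < 128) (st : List (List Int) × List Int) :
    vbStepG st b = (st.1, st.2 ++ [b]) := by
  have : ¬ b ≥ 128 := by omega
  simp [vbStepG, this]

theorem vbStepG_ge {b : Int} (h : b ≥ 128) (st : List (List Int) × List Int) :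
    vbStepG st b = (st.1 ++ [st.2 ++ [b]], []) := by simp [vbStepG, h]

theorem vbPfold_snoc (cur : List Int) (b : Int) :
    vbPfold (cur ++ [b]) = 128 * vbPfold cur + b := by
  simp [vbPfold]

theorem vbDecodeGroup_snoc (cur : List Int) (b : Int) :
    vbDecodeGroup (cur ++ [b]) = 128 * vbPfold cur + (b - 128) := by
  simp [vbDecodeGroup, vbPfold]

theorem vbGroups_prefix (bs : List Int) (gs : List (List Int)) (cur : List Int) :
    (bs.foldl vbStepG (gs, cur)).1 = gs ++ (bs.foldl vbStepG ([], cur)).1 := by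
  induction bs generalizing gs cur with
  | nil => simp
  | cons b bs ih =>
    simp only [List.foldl_cons]
    by_cases h : b ≥ 128
    · rw [vbStepG_ge h, vbStepG_ge h]
      dsimp only [List.nil_append]
      rw [ih (gs ++ [cur ++ [b]]) [], ih [cur ++ [b]] []]
      simp
    · have h' : b < 128 := by omega
      rw [vbStepG_lt h', vbStepG_lt h']
      exact ih gs (cur ++ [b])

theorem vb_main (bs : List Int) (nums : List Int) (cur : List Int) :
    (bs.foldl vbStepA (nums, vbPfold cur)).1
    = nums ++ ((bs.foldl vbStepG ([], cur)).1).map vbDecodeGroup := by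
  induction bs generalizing nums cur with
  | nil => simp
  | cons b bs ih =>
    simp only [List.foldl_cons]
    by_cases h : b < 128
    · rw [vbStepA_lt h, vbStepG_lt h]
      rw [← vbPfold_snoc]
      exact ih nums (cur ++ [b])
    · have h' : b ≥ 128 := by omega
      rw [vbStepA_ge h', vbStepG_ge h']
      dsimp only [List.nil_append]
      have h0 : (0 : Int) = vbPfold [] := rfl
      rw [h0, ih (nums ++ [128 * vbPfold cur + (b - 128)]) [],
        vbGroups_prefix bs [cur ++ [b]] []]
      simp [vbDecodeGroup_snoc]

theorem vb_decode_eq_stepA (bs : List Int) :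
    vb_decode bs = (bs.foldl vbStepA ([], 0)).1 := rfl

theorem vbGroups_eq_stepG (bs : List Int) :
    vbGroups bs = (bs.foldl vbStepG ([], [])).1 := rfl

-- ===== VERDICT (by name: the statement is the Claim_ definition above) =====
theorem vb_decode_spec : Claim_equal_vb_decode := by
  intro bs _
  unfold Spec_vb_decode vb_decode_alt
  rw [vb_decode_eq_stepA, vbGroups_eq_stepG,
    show (0 : Int) = vbPfold [] from rfl, vb_main bs [] []]
  simp
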